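-- pv_equiv track=rewrite | github.com/leonanfecosta/restaurant-orders | src/analyze_log.py | favorite_order
-- ===== SOURCE A (Python) =====
-- def favorite_order(name, orders):
--     count_orders = {}
--     for order in orders:
--         if order["name"] == name:
--             if order["dish"] not in count_orders:
--                 count_orders[order["dish"]] = 1
--             else:
--                 count_orders[order["dish"]] += 1
--
--     return max(count_orders, key=count_orders.get)
-- ===== SOURCE B (Python) =====
-- def _best(ds):
--     head = ds[0]
--     c = ds.count(head)
--     rest = [d for d in ds if d != head]
--     if not rest:
--         return head, c
--     bd, bc = _best(rest)
--     if c < bc: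
--         return bd, bc
--     return head, c
--
--
-- def favorite_order(name, orders):
--     dishes = [order["dish"] for order in orders if order["name"] == name]
--     return _best(dishes)[0]
-- ===== Notes on version B (the rewrite author's own statement) =====
-- stated objective: alternative
-- what changed: B replaces the count-dictionary plus dict-key max by a divide-and-conquer recursion on the list of matching dishes: take the first dish, count its occurrences, strip all of them out, recurse on the remainder, and keep the head on ties; no dict, no max-with-key.
import Mathlib
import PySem

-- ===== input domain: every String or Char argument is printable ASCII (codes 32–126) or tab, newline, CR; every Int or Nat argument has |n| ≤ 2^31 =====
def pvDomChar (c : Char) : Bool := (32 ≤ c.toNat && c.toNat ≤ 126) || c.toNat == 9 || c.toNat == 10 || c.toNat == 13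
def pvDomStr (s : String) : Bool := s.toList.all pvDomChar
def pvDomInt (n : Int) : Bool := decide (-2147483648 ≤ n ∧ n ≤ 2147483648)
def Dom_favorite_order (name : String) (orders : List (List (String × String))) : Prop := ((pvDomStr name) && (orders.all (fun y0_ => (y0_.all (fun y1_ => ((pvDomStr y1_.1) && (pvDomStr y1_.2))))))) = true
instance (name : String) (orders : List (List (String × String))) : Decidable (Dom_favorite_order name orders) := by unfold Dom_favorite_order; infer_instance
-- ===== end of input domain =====

-- B replaces A's running count-dictionary + dict-key maximum by a divide-and-conquer recursion
-- on the list of matching dishes (strip all copies of the first dish, recurse, head wins ties).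

-- ===== PORT A =====
-- order["name"] / order["dish"] are ported as getD with default "": Pre_ guarantees the keys are
-- present (Python raises KeyError otherwise), so inside Pre_ getD is the Python lookup.
-- max(count_orders, key=count_orders.get): .get on a key of the dict is its value, ported getD k 0.
def favA_counts (name : String) (orders : List (List (String × String))) : PySem.Dict String Int :=
  orders.foldl
    (fun cnt order =>
      if (PySem.Dict.mk order).getD "name" "" == name then
        (if ¬ ((cnt.contains ((PySem.Dict.mk order).getD "dish" "")) = true) then
          cnt.insert ((PySem.Dict.mk order).getD "dish" "") 1
        else
          cnt.insert ((PySem.Dict.mk order).getD "dish" "")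
            (cnt.getD ((PySem.Dict.mk order).getD "dish" "") 0 + 1))
      else cnt)
    PySem.Dict.empty

def favorite_order (name : String) (orders : List (List (String × String))) : String :=
  ((PySem.List.max? (favA_counts name orders).keys
      (fun k => (favA_counts name orders).getD k 0)).getD "")

-- ===== PORT B =====
-- _best(ds): head = ds[0]; c = ds.count(head); rest = [d for d in ds if d != head]; recurse.
-- On [] Python's ds[0] raises IndexError; Pre_ excludes that input, the ("", 0) branch is unreachable.
def favB_best : List String → String × Int
  | [] => ("", 0)
  | h0 :: t =>
    let c : Int := ((h0 :: t).count h0 : Int)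
    let rest := (h0 :: t).filter (fun d => !(d == h0))
    if rest = [] then (h0, c)
    else
      let b := favB_best rest
      if c < b.2 then b else (h0, c)
termination_by ds => ds.length
decreasing_by
  simp only [List.filter]
  simp only [BEq.rfl, Bool.not_true, List.length_cons]
  exact Nat.lt_succ_of_le (List.length_filter_le _ _)

def favB_dishes (name : String) (orders : List (List (String × String))) : List String :=
  (orders.filter (fun order => (PySem.Dict.mk order).getD "name" "" == name)).map
    (fun order => (PySem.Dict.mk order).getD "dish" "")

def favorite_order_alt (name : String) (orders : List (List (String × String))) : String :=
  (favB_best (favB_dishes name orders)).1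

-- ===== PRECONDITION & SPEC =====
-- Pre_ excludes exactly the inputs on which the Python A raises: an order missing the "name" key,
-- a matching order missing the "dish" key (KeyError), or no order matching `name` at all
-- (max over an empty dict: ValueError; B's ds[0] raises IndexError there too).
def Pre_favorite_order (name : String) (orders : List (List (String × String))) : Prop :=
  (∀ o ∈ orders, (PySem.Dict.mk o).contains "name" = true ∧
      ((PySem.Dict.mk o).getD "name" "" = name → (PySem.Dict.mk o).contains "dish" = true)) ∧
  (orders.any (fun o => (PySem.Dict.mk o).getD "name" "" == name)) = true
instance (name : String) (orders : List (List (String × String))) : Decidable (Pre_favorite_order name orders) := by unfold Pre_favorite_order; infer_instance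
def pvWitness_favorite_order : String × (List (List (String × String))) :=
  ("amy", [[("name", "amy"), ("dish", "soup")], [("name", "bob"), ("dish", "rice")]])
def Spec_favorite_order (name : String) (orders : List (List (String × String))) (out : String) : Prop := out = favorite_order_alt name orders
instance (name : String) (orders : List (List (String × String))) (out : String) : Decidable (Spec_favorite_order name orders out) := by unfold Spec_favorite_order; infer_instance

-- ===== CLAIM (what is proved, stated in full; the proofs are below) =====
def Claim_equal_favorite_order : Prop := ∀ (name : String) (orders : List (List (String × String))), Dom_favorite_order name orders → Pre_favorite_order name orders → Spec_favorite_order name orders (favorite_order name orders)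

-- ===== LEMMAS AND PROOFS =====

-- left-biased strict-max combiner: the one step of Python's max fold
def pvCombine (k : String → Int) (x y : String) : String := if k x < k y then y else x

theorem combine_assoc (k : String → Int) (h a x : String) :
    pvCombine k (pvCombine k h a) x = pvCombine k h (pvCombine k a x) := by
  unfold pvCombine; split_ifs <;> first | rfl | omega

theorem max?_cons (k : String → Int) : ∀ (t : List String) (h : String),
    PySem.List.max? (h :: t) k = some (t.foldl (pvCombine k) h) := by
  intro t
  induction t with
  | nil => intro h; rfl
  | cons x t ih =>
    intro h
    have h1 : PySem.List.max? (h :: x :: t) k = PySem.List.max? (pvCombine k h x :: t) k := by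
      simp only [PySem.List.max?, List.foldl_cons]
      by_cases hc : k h < k x <;> simp [pvCombine, hc]
    rw [h1, ih, List.foldl_cons]

-- duplicates of h never strictly exceed an accumulator whose key already dominates k h
theorem foldl_combine_filter (k : String → Int) (h : String) (t : List String) :
    ∀ b : String, k h ≤ k b →
      t.foldl (pvCombine k) b = (t.filter (fun x => !(x == h))).foldl (pvCombine k) b := by
  induction t with
  | nil => intro b _; rfl
  | cons x t ih =>
    intro b hb
    by_cases hx : x = h
    · subst hx
      have : pvCombine k b x = b := by unfold pvCombine; rw [if_neg (by omega)]
      simp [List.filter, List.foldl, this, ih b hb]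
    · have hkeep : (!(x == h)) = true := by simp [hx]
      have hb' : k h ≤ k (pvCombine k b x) := by
        unfold pvCombine; split_ifs with hlt <;> omega
      simp [List.filter, hkeep, List.foldl, ih _ hb']

theorem foldl_combine_shift (k : String → Int) (u : List String) :
    ∀ h a : String, u.foldl (pvCombine k) (pvCombine k h a) = pvCombine k h (u.foldl (pvCombine k) a) := by
  induction u with
  | nil => intro h a; rfl
  | cons x u ih =>
    intro h a
    simp only [List.foldl, combine_assoc, ih]

theorem max?_cons_filter (k : String → Int) (h : String) (t : List String) :
    PySem.List.max? (h :: t) k =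
      some (match PySem.List.max? (t.filter (fun x => !(x == h))) k with
        | none => h
        | some w => if k h < k w then w else h) := by
  rw [max?_cons, foldl_combine_filter k h t h le_rfl]
  cases hrest : t.filter (fun x => !(x == h)) with
  | nil => simp [PySem.List.max?, List.foldl]
  | cons w0 u =>
    rw [max?_cons]
    have : (w0 :: u).foldl (pvCombine k) h = pvCombine k h (u.foldl (pvCombine k) w0) := by
      simp only [List.foldl]
      have : pvCombine k h w0 = pvCombine k h w0 := rfl
      exact foldl_combine_shift k u h w0
    simp [this, pvCombine]

-- the B recursion computes Python's first-maximum together with its key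
theorem best_eq_aux (n : Nat) : ∀ (ds : List String), ds.length ≤ n → ds ≠ [] →
    ∀ (k : String → Int), (∀ d ∈ ds, k d = (ds.count d : Int)) →
    ∀ w, PySem.List.max? ds k = some w → favB_best ds = (w, k w) := by
  induction n with
  | zero => intro ds hlen hne; cases ds with
    | nil => exact absurd rfl hne
    | cons h0 t => simp at hlen
  | succ n ih =>
    intro ds hlen hne k hk w hw
    cases ds with
    | nil => exact absurd rfl hne
    | cons h0 t =>
      have hfe : (h0 :: t).filter (fun d => !(d == h0)) = t.filter (fun x => !(x == h0)) := by
        simp [List.filter]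
      rw [max?_cons_filter] at hw
      have hkh0 : k h0 = ((h0 :: t).count h0 : Int) := hk h0 (by simp)
      rw [favB_best]
      simp only [hfe]
      by_cases hrest : t.filter (fun x => !(x == h0)) = []
      · rw [if_pos hrest]
        rw [hrest] at hw
        simp only [PySem.List.max?, List.foldl_nil] at hw
        have : w = h0 := by exact (Option.some.injEq _ _ ▸ hw).symm
        rw [this, hkh0]
      · rw [if_neg hrest]
        obtain ⟨w', hw'⟩ : ∃ w', PySem.List.max? (t.filter (fun x => !(x == h0))) k = some w' := by
          cases h : PySem.List.max? (t.filter (fun x => !(x == h0))) k with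
          | none => exact absurd ((PySem.List.max?_eq_none_iff _ _).mp h) hrest
          | some m => exact ⟨m, rfl⟩
        rw [hw'] at hw
        have hwval : w = if k h0 < k w' then w' else h0 := (Option.some.injEq _ _ ▸ hw).symm
        have hlen' : (t.filter (fun x => !(x == h0))).length ≤ n := by
          have := List.length_filter_le (fun x => !(x == h0)) t
          simp only [List.length_cons] at hlen; omega
        have hkrest : ∀ d ∈ t.filter (fun x => !(x == h0)),
            k d = ((t.filter (fun x => !(x == h0))).count d : Int) := by
          intro d hd
          have hmem : d ∈ t := List.mem_of_mem_filter hd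
          have hne0 : (!(d == h0)) = true := (List.mem_filter.mp hd).2
          rw [List.count_filter (p := fun x => !(x == h0)) (a := d) hne0]
          have : (h0 :: t).count d = t.count d := by
            rw [List.count_cons]
            simp only [beq_iff_eq]
            have : ¬ (h0 = d) := by
              intro he; rw [he] at hne0; simp at hne0
            simp [this]
          rw [hk d (by simp [hmem]), this]
        rw [ih _ hlen' hrest k hkrest w' hw']
        by_cases hcmp : k h0 < k w'
        · rw [if_pos (by rw [← hkh0]; exact hcmp), hwval, if_pos hcmp]
        · rw [if_neg (by rw [← hkh0]; exact hcmp), hwval, if_neg hcmp, hkh0]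

theorem best_eq (ds : List String) (hne : ds ≠ []) (k : String → Int)
    (hk : ∀ d ∈ ds, k d = (ds.count d : Int)) (w : String)
    (hw : PySem.List.max? ds k = some w) : favB_best ds = (w, k w) :=
  best_eq_aux ds.length ds le_rfl hne k hk w hw

theorem max?_ofList_eq {α : Type} [BEq α] [LawfulBEq α] (c : α → Int) (xs : List α) :
    PySem.List.max? (PySem.Set.ofList xs) c = PySem.List.max? xs c := by
  induction xs using List.reverseRecOn with
  | nil => rfl
  | append_singleton xs x ih =>
    have hof : PySem.Set.ofList (xs ++ [x]) = PySem.Set.add (PySem.Set.ofList xs) x := by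
      simp [PySem.Set.ofList, List.foldl_append, PySem.Set.add]
    have hstep : ∀ (l : List α), PySem.List.max? (l ++ [x]) c =
        (match PySem.List.max? l c with
          | none => some x
          | some m => if c m < c x then some x else some m) := by
      intro l
      simp only [PySem.List.max?, List.foldl_append, List.foldl_cons, List.foldl_nil]
      rfl
    by_cases hx : x ∈ xs
    · have hcont : (PySem.Set.ofList xs).contains x = true := by
        simp [PySem.Set.mem_ofList, hx]
      rw [hof, PySem.Set.add, if_pos hcont, ih, hstep]
      obtain ⟨m, hm⟩ : ∃ m, PySem.List.max? xs c = some m := by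
        cases h : PySem.List.max? xs c with
        | none => exact absurd ((PySem.List.max?_eq_none_iff xs c).mp h ▸ hx) (by simp)
        | some m => exact ⟨m, rfl⟩
      have hle : c x ≤ c m := PySem.List.max?_isMax hm x hx
      simp [hm, not_lt.mpr hle]
    · have hcont : (PySem.Set.ofList xs).contains x = false := by
        simp [PySem.Set.mem_ofList]; exact hx
      rw [hof, PySem.Set.add, if_neg (by rw [hcont]; simp), hstep, ih, hstep]

-- A's loop over `orders` builds exactly Counter(dishes) for B's list `dishes`
theorem counts_eq_counter (name : String) (orders : List (List (String × String))) :
    favA_counts name orders = PySem.Dict.counter (favB_dishes name orders) := by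
  unfold favA_counts favB_dishes
  rw [PySem.List.foldl_if_eq_foldl_filter
        (p := fun order => (PySem.Dict.mk order).getD "name" "" == name)]
  rw [← PySem.Dict.foldl_insert_getD_add_one_eq_counter, List.foldl_map]
  apply PySem.List.foldl_congr_mem
  intro cnt o _
  by_cases h : cnt.contains ((PySem.Dict.mk o).getD "dish" "") = true
  · simp [h]
  · simp [h, PySem.Dict.getD_of_not_contains cnt 0 (by simpa using h)]

-- ===== VERDICT (by name: the statement is the Claim_ definition above) =====
theorem favorite_order_spec : Claim_equal_favorite_order := by
  intro name orders _ hpre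
  show favorite_order name orders = favorite_order_alt name orders
  have hne : favB_dishes name orders ≠ [] := by
    obtain ⟨o, ho, hmatch⟩ := List.any_eq_true.mp hpre.2
    unfold favB_dishes
    simp only [ne_eq, List.map_eq_nil_iff, List.filter_eq_nil_iff]
    intro hall; exact absurd hmatch (by simpa using hall o ho)
  unfold favorite_order favorite_order_alt
  rw [counts_eq_counter, PySem.Dict.keys_counter]
  rw [show (fun k => (PySem.Dict.counter (favB_dishes name orders)).getD k 0)
      = (fun k => (((favB_dishes name orders).count k : Int)) : String → Int) from
    funext fun k => PySem.Dict.getD_counter _ k]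
  rw [max?_ofList_eq]
  obtain ⟨w, hw⟩ : ∃ w, PySem.List.max? (favB_dishes name orders)
      (fun d => ((favB_dishes name orders).count d : Int)) = some w := by
    cases h : PySem.List.max? (favB_dishes name orders)
        (fun d => ((favB_dishes name orders).count d : Int)) with
    | none => exact absurd ((PySem.List.max?_eq_none_iff _ _).mp h) hne
    | some m => exact ⟨m, rfl⟩
  rw [hw, best_eq _ hne _ (fun d _ => rfl) w hw]
  simp
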